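-- pv_equiv track=rewrite | github.com/andrewschultz/miscellany | pyhead/mytools.py | text_from_values
-- ===== SOURCE A (Python) =====
-- def text_from_values(my_dict, my_num):
--     descending = sorted(my_dict, key=my_dict.get, reverse = True)
--     for q in sorted(my_dict, key=my_dict.get, reverse = True):
--         if my_num > my_dict[q]:
--             return q
--     try:
--         return descending[-1]
--     except:
--         return 'black'
-- ===== SOURCE B (Python) =====
-- def text_from_values(my_dict, my_num):
--     best = None   # (key, value) with the largest value < my_num; earliest-inserted wins ties
--     low = None    # (key, value) with the smallest value overall; latest-inserted wins ties
--     for k, v in my_dict.items():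
--         if v < my_num and (best is None or v > best[1]):
--             best = (k, v)
--         if low is None or v <= low[1]:
--             low = (k, v)
--     if best is not None:
--         return best[0]
--     if low is not None:
--         return low[0]
--     return 'black'
-- ===== Notes on version B (the rewrite author's own statement) =====
-- stated objective: alternative
-- what changed: Replaced the two stable reverse sorts plus a scan with a single linear pass over the items that maintains two candidates: the largest value strictly below my_num (earliest wins ties) and the overall minimum value (latest wins ties).
import Mathlib
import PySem

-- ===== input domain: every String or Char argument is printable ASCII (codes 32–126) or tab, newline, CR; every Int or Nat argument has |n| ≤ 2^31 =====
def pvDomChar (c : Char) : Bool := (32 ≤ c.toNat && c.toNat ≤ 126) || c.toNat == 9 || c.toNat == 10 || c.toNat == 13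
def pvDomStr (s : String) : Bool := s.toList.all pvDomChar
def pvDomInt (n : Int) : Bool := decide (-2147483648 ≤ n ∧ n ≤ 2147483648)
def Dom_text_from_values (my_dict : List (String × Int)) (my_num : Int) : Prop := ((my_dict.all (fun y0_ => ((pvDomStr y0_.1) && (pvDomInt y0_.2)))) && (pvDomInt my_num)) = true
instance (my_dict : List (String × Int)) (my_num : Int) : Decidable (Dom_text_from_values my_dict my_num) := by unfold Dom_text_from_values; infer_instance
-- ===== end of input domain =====

-- B replaces A's two stable reverse sorts + scan by one linear pass keeping two candidates.
-- Both ports decode the dict argument with PySem.Dict.ofList (Python builds a dict from the pairs, so a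
-- duplicated key keeps its first position and last value).

-- ===== PORT A =====
-- 'for q in sorted(...): if my_num > my_dict[q]: return q' — q is always a key of d, so d[q] never
-- raises KeyError and getD is exact here.
def tfvLoop (d : PySem.Dict String Int) (my_num : Int) : List String → Option String
  | [] => none
  | q :: rest => if my_num > d.getD q 0 then some q else tfvLoop d my_num rest

def text_from_values (my_dict : List (String × Int)) (my_num : Int) : String :=
  let d := PySem.Dict.ofList my_dict
  let descending := PySem.List.sorted d.keys (fun q => d.getD q 0) true
  match tfvLoop d my_num (PySem.List.sorted d.keys (fun q => d.getD q 0) true) with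
  | some q => q
  | none =>
    -- 'try: return descending[-1] except: return "black"' — IndexError exactly when pyGet? is none
    match PySem.List.pyGet? descending (-1) with
    | some q => q
    | none => "black"

-- ===== PORT B =====
-- one pass: s.1 = best (largest value < my_num, earliest wins ties), s.2 = low (smallest value, latest wins ties)
def tfvAltStep (my_num : Int) (s : Option (String × Int) × Option (String × Int)) (p : String × Int) :
    Option (String × Int) × Option (String × Int) :=
  ((if decide (p.2 < my_num) && s.1.all (fun q => decide (p.2 > q.2)) then some p else s.1),
   (if s.2.all (fun q => decide (p.2 ≤ q.2)) then some p else s.2))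

def text_from_values_alt (my_dict : List (String × Int)) (my_num : Int) : String :=
  let r := (PySem.Dict.ofList my_dict).items.foldl (tfvAltStep my_num) (none, none)
  match r.1 with
  | some p => p.1
  | none =>
    match r.2 with
    | some p => p.1
    | none => "black"

-- ===== PRECONDITION & SPEC =====
def Spec_text_from_values (my_dict : List (String × Int)) (my_num : Int) (out : String) : Prop := out = text_from_values_alt my_dict my_num
instance (my_dict : List (String × Int)) (my_num : Int) (out : String) : Decidable (Spec_text_from_values my_dict my_num out) := by unfold Spec_text_from_values; infer_instance

-- ===== CLAIM (what is proved, stated in full; the proofs are below) =====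
def Claim_equal_text_from_values : Prop := ∀ (my_dict : List (String × Int)) (my_num : Int), Dom_text_from_values my_dict my_num → Spec_text_from_values my_dict my_num (text_from_values my_dict my_num)

-- ===== LEMMAS AND PROOFS =====

-- generalized single-pass steps, over an arbitrary element type with value function `val`
def tfvBestStep {α : Type} (val : α → Int) (m : Int) (b : Option α) (x : α) : Option α :=
  if decide (val x < m) && b.all (fun q => decide (val x > val q)) then some x else b

def tfvMnStep {α : Type} (val : α → Int) (b : Option α) (x : α) : Option α :=
  if b.all (fun q => decide (val x ≤ val q)) then some x else b

-- insertBy with the reverse comparator keeps the list value-descending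
theorem tfv_pairwise_insertBy {α : Type} (val : α → Int) (x : α) (acc : List α)
    (h : acc.Pairwise (fun a b => val b ≤ val a)) :
    (PySem.List.insertBy (fun a b => decide (val b < val a)) x acc).Pairwise
      (fun a b => val b ≤ val a) := by
  induction acc with
  | nil => simp [PySem.List.insertBy]
  | cons y ys ih =>
    rw [List.pairwise_cons] at h
    by_cases hxy : val y < val x
    · simp only [PySem.List.insertBy, hxy, decide_true]
      refine List.pairwise_cons.2 ⟨?_, List.pairwise_cons.2 ⟨h.1, h.2⟩⟩
      intro z hz
      rcases List.mem_cons.1 hz with rfl | hz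
      · exact le_of_lt hxy
      · exact le_trans (h.1 z hz) (le_of_lt hxy)
    · simp only [PySem.List.insertBy, hxy, decide_false, Bool.false_eq_true, if_false]
      refine List.pairwise_cons.2 ⟨?_, ih h.2⟩
      intro z hz
      rcases (PySem.List.mem_insertBy _ x z ys).1 hz with rfl | hz
      · omega
      · exact h.1 z hz

-- first element with value < m in the insertion = one best-candidate step
theorem tfv_find?_insertBy {α : Type} (val : α → Int) (m : Int) (x : α) (acc : List α)
    (h : acc.Pairwise (fun a b => val b ≤ val a)) :
    (PySem.List.insertBy (fun a b => decide (val b < val a)) x acc).find?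
        (fun a => decide (val a < m)) =
      tfvBestStep val m (acc.find? (fun a => decide (val a < m))) x := by
  induction acc with
  | nil => simp [PySem.List.insertBy, tfvBestStep]
  | cons y ys ih =>
    rw [List.pairwise_cons] at h
    by_cases hxy : val y < val x
    · have hins : PySem.List.insertBy (fun a b => decide (val b < val a)) x (y :: ys) =
          x :: y :: ys := by
        simp [PySem.List.insertBy, hxy]
      rw [hins]
      by_cases hxm : val x < m
      · rw [List.find?_cons_of_pos (by simp [hxm])]
        rcases hfind : (y :: ys).find? (fun a => decide (val a < m)) with _ | q
        · simp [tfvBestStep, hxm]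
        · have hq : q ∈ y :: ys := List.mem_of_find?_eq_some hfind
          have hqy : val q ≤ val y := by
            rcases List.mem_cons.1 hq with rfl | hq
            · exact le_refl _
            · exact h.1 q hq
          simp [tfvBestStep, hxm, show val x > val q by omega]
      · rw [List.find?_cons_of_neg (by simp [hxm])]
        rcases (y :: ys).find? (fun a => decide (val a < m)) with _ | q
        · simp [tfvBestStep, hxm]
        · simp [tfvBestStep, hxm]
    · have hins : PySem.List.insertBy (fun a b => decide (val b < val a)) x (y :: ys) =
          y :: PySem.List.insertBy (fun a b => decide (val b < val a)) x ys := by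
        simp [PySem.List.insertBy, hxy]
      rw [hins]
      by_cases hym : val y < m
      · rw [List.find?_cons_of_pos (by simp [hym]), List.find?_cons_of_pos (by simp [hym])]
        simp [tfvBestStep, show ¬ (val x > val y) by omega]
      · rw [List.find?_cons_of_neg (by simp [hym]), List.find?_cons_of_neg (by simp [hym]),
          ih h.2]

-- last element after the insertion = one min-candidate step
theorem tfv_getLast?_insertBy {α : Type} (val : α → Int) (x : α) (acc : List α)
    (h : acc.Pairwise (fun a b => val b ≤ val a)) :
    (PySem.List.insertBy (fun a b => decide (val b < val a)) x acc).getLast? =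
      tfvMnStep val acc.getLast? x := by
  induction acc with
  | nil => simp [PySem.List.insertBy, tfvMnStep]
  | cons y ys ih =>
    rw [List.pairwise_cons] at h
    by_cases hxy : val y < val x
    · have hins : PySem.List.insertBy (fun a b => decide (val b < val a)) x (y :: ys) =
          x :: y :: ys := by
        simp [PySem.List.insertBy, hxy]
      rw [hins, List.getLast?_cons_cons]
      rcases hlast : (y :: ys).getLast? with _ | q
      · simp at hlast
      · have hq : q ∈ y :: ys := List.mem_of_getLast? hlast
        have hqy : val q ≤ val y := by
          rcases List.mem_cons.1 hq with rfl | hq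
          · exact le_refl _
          · exact h.1 q hq
        simp [tfvMnStep, show ¬ (val x ≤ val q) by omega]
    · have hins : PySem.List.insertBy (fun a b => decide (val b < val a)) x (y :: ys) =
          y :: PySem.List.insertBy (fun a b => decide (val b < val a)) x ys := by
        simp [PySem.List.insertBy, hxy]
      rw [hins]
      cases ys with
      | nil =>
        simp [PySem.List.insertBy, tfvMnStep, show val x ≤ val y by omega]
      | cons z zs =>
        have hne : PySem.List.insertBy (fun a b => decide (val b < val a)) x (z :: zs) ≠ [] := by
          intro hc
          have := (PySem.List.mem_insertBy (fun a b => decide (val b < val a)) x x (z :: zs)).2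
            (Or.inl rfl)
          rw [hc] at this; exact absurd this (List.not_mem_nil)
        rcases List.exists_cons_of_ne_nil hne with ⟨w, ws, hw⟩
        rw [hw, List.getLast?_cons_cons, ← hw, ih h.2, List.getLast?_cons_cons]

-- the whole sort-fold, relative to any sorted accumulator
theorem tfv_foldl_insertBy {α : Type} (val : α → Int) (m : Int) (xs : List α) :
    ∀ acc : List α, acc.Pairwise (fun a b => val b ≤ val a) →
      (xs.foldl (fun acc x => PySem.List.insertBy (fun a b => decide (val b < val a)) x acc) acc).find?
          (fun a => decide (val a < m)) =
        xs.foldl (tfvBestStep val m) (acc.find? (fun a => decide (val a < m))) ∧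
      (xs.foldl (fun acc x => PySem.List.insertBy (fun a b => decide (val b < val a)) x acc) acc).getLast? =
        xs.foldl (tfvMnStep val) acc.getLast? := by
  induction xs with
  | nil => intro acc _; exact ⟨rfl, rfl⟩
  | cons x xs ih =>
    intro acc hacc
    have hins := tfv_pairwise_insertBy val x acc hacc
    obtain ⟨h1, h2⟩ := ih (PySem.List.insertBy (fun a b => decide (val b < val a)) x acc) hins
    constructor
    · rw [List.foldl_cons, List.foldl_cons, h1, tfv_find?_insertBy val m x acc hacc]
    · rw [List.foldl_cons, List.foldl_cons, h2, tfv_getLast?_insertBy val x acc hacc]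

-- characterization of the stable reverse sort A uses
theorem tfv_sorted_char {α : Type} (val : α → Int) (m : Int) (xs : List α) :
    (PySem.List.sorted xs val true).find? (fun a => decide (val a < m)) =
        xs.foldl (tfvBestStep val m) none ∧
      (PySem.List.sorted xs val true).getLast? = xs.foldl (tfvMnStep val) none := by
  rw [PySem.List.sorted_rev_eq_foldl_insertBy]
  simpa using tfv_foldl_insertBy val m xs [] (List.Pairwise.nil)

theorem tfv_loop_eq_find? (d : PySem.Dict String Int) (m : Int) (ks : List String) :
    tfvLoop d m ks = ks.find? (fun q => decide (d.getD q 0 < m)) := by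
  induction ks with
  | nil => rfl
  | cons q rest ih =>
    rw [List.find?_cons]
    by_cases h : m > d.getD q 0
    · simp [tfvLoop, h]
    · have h' : ¬ (d.getD q 0 < m) := h
      simp [tfvLoop, h, ih]

theorem tfv_pyGet?_neg_one {α : Type} (xs : List α) :
    PySem.List.pyGet? xs (-1) = xs.getLast? := by
  cases xs with
  | nil => rfl
  | cons x t =>
    simp only [PySem.List.pyGet?, PySem.List.pyIdx?]
    rw [if_neg (by omega : ¬ (0 : Int) ≤ -1),
      if_pos (by rw [List.length_cons]; push_cast; omega :
        -(((x :: t).length : Nat) : Int) ≤ -1)]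
    have h1 : ((- -1 : Int)).toNat = 1 := rfl
    rw [h1]
    simp only [Option.bind_some]
    rw [← List.getLast?_eq_getElem?]

-- B's pair state over items = the two generalized folds over keys, mapped through k ↦ (k, d.getD k 0)
theorem tfv_alt_best_fold (d : PySem.Dict String Int) (m : Int) (ks : List String) :
    ∀ b : Option String,
      ks.foldl (fun s k => tfvBestStep (fun p => p.2) m s (k, d.getD k 0))
          (b.map (fun k => (k, d.getD k 0))) =
        (ks.foldl (tfvBestStep (fun k => d.getD k 0) m) b).map (fun k => (k, d.getD k 0)) := by
  induction ks with
  | nil => intro b; rfl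
  | cons k ks ih =>
    intro b
    rw [List.foldl_cons, List.foldl_cons, ← ih]
    congr 1
    cases b <;> simp [tfvBestStep] <;> split <;> simp
theorem tfv_alt_mn_fold (d : PySem.Dict String Int) (ks : List String) :
    ∀ b : Option String,
      ks.foldl (fun s k => tfvMnStep (fun p => p.2) s (k, d.getD k 0))
          (b.map (fun k => (k, d.getD k 0))) =
        (ks.foldl (tfvMnStep (fun k => d.getD k 0)) b).map (fun k => (k, d.getD k 0)) := by
  induction ks with
  | nil => intro b; rfl
  | cons k ks ih =>
    intro b
    rw [List.foldl_cons, List.foldl_cons, ← ih]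
    congr 1
    cases b <;> simp [tfvMnStep] <;> split <;> simp

-- ===== VERDICT (by name: the statement is the Claim_ definition above) =====
theorem text_from_values_spec : Claim_equal_text_from_values := by
  intro my_dict my_num _
  unfold Spec_text_from_values
  have hnd : (PySem.Dict.ofList my_dict).keys.Nodup := PySem.Dict.nodup_keys_ofList my_dict
  have hitems : (PySem.Dict.ofList my_dict).items =
      (PySem.Dict.ofList my_dict).keys.map (fun k => (k, (PySem.Dict.ofList my_dict).getD k 0)) :=
    PySem.Dict.items_eq_map_keys _ hnd 0
  obtain ⟨h1, h2⟩ := tfv_sorted_char (fun k => (PySem.Dict.ofList my_dict).getD k 0) my_num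
    (PySem.Dict.ofList my_dict).keys
  have hb := tfv_alt_best_fold (PySem.Dict.ofList my_dict) my_num (PySem.Dict.ofList my_dict).keys none
  have hm := tfv_alt_mn_fold (PySem.Dict.ofList my_dict) (PySem.Dict.ofList my_dict).keys none
  simp only [Option.map_none] at hb hm
  have hsplit : (PySem.Dict.ofList my_dict).keys.foldl
      (fun s k => tfvAltStep my_num s (k, (PySem.Dict.ofList my_dict).getD k 0)) (none, none) =
      ((PySem.Dict.ofList my_dict).keys.foldl
        (fun s k => tfvBestStep (fun p => p.2) my_num s (k, (PySem.Dict.ofList my_dict).getD k 0)) none,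
       (PySem.Dict.ofList my_dict).keys.foldl
        (fun s k => tfvMnStep (fun p => p.2) s (k, (PySem.Dict.ofList my_dict).getD k 0)) none) := by
    exact PySem.List.foldl_prod_mk
      (f := fun (s : Option (String × Int)) (k : String) =>
        tfvBestStep (fun p => p.2) my_num s (k, (PySem.Dict.ofList my_dict).getD k 0))
      (g := fun (s : Option (String × Int)) (k : String) =>
        tfvMnStep (fun p => p.2) s (k, (PySem.Dict.ofList my_dict).getD k 0))
      (l := (PySem.Dict.ofList my_dict).keys) (a := none) (b := none)
  unfold text_from_values text_from_values_alt
  show (match tfvLoop (PySem.Dict.ofList my_dict) my_num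
          (PySem.List.sorted (PySem.Dict.ofList my_dict).keys
            (fun q => (PySem.Dict.ofList my_dict).getD q 0) true) with
        | some q => q
        | none =>
          match PySem.List.pyGet?
              (PySem.List.sorted (PySem.Dict.ofList my_dict).keys
                (fun q => (PySem.Dict.ofList my_dict).getD q 0) true) (-1) with
          | some q => q
          | none => "black") =
      (match ((PySem.Dict.ofList my_dict).items.foldl (tfvAltStep my_num) (none, none)).1 with
       | some p => p.1
       | none =>
         match ((PySem.Dict.ofList my_dict).items.foldl (tfvAltStep my_num) (none, none)).2 with
         | some p => p.1
         | none => "black")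
  rw [tfv_loop_eq_find?, h1, tfv_pyGet?_neg_one, h2, hitems, List.foldl_map, hsplit, hb, hm]
  rcases (PySem.Dict.ofList my_dict).keys.foldl
      (tfvBestStep (fun k => (PySem.Dict.ofList my_dict).getD k 0) my_num) none with _ | q
  · rcases (PySem.Dict.ofList my_dict).keys.foldl
        (tfvMnStep (fun k => (PySem.Dict.ofList my_dict).getD k 0)) none with _ | q <;> rfl
  · rfl
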